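-- pv_equiv track=rewrite | github.com/joshanashakya/dissertation | workspace/dataset/java-python/GeeksForGeeks/3810/A/2.py | sumOddOccurring
-- ===== SOURCE A (Python) =====
-- def sumOddOccurring(mat):
--
--     # Store frequencies of elements
--     # in matrix
--     mp = {}
--     n, m = len(mat), len(mat[0])
--     for i in range(n):
--         for j in range(m):
--             if mat[i][j] in mp:
--                 mp[mat[i][j]] = mp.get(mat[i][j]) + 1
--             else:
--                 mp[mat[i][j]] = 1
--
--     # Sum of odd frequency elements
--     _sum = 0
--     for i in range(n):
--         for j in range(m):
--             if mp.get(mat[i][j]) % 2 == 1: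
--                 _sum+=mat[i][j]
--     return _sum
-- ===== SOURCE B (Python) =====
-- def sumOddOccurring(mat):
--     m = len(mat[0])
--     freq = {}
--     for row in mat:
--         for j in range(m):
--             freq[row[j]] = freq.get(row[j], 0) + 1
--     return sum(v * c for v, c in freq.items() if c % 2 == 1)
-- ===== Notes on version B (the rewrite author's own statement) =====
-- stated objective: simpler
-- what changed: B keeps one counting pass over the cells but replaces A's second full matrix scan (testing each cell's frequency parity) with a single pass over the frequency table, summing value*count for the odd-count entries.
import Mathlib
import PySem

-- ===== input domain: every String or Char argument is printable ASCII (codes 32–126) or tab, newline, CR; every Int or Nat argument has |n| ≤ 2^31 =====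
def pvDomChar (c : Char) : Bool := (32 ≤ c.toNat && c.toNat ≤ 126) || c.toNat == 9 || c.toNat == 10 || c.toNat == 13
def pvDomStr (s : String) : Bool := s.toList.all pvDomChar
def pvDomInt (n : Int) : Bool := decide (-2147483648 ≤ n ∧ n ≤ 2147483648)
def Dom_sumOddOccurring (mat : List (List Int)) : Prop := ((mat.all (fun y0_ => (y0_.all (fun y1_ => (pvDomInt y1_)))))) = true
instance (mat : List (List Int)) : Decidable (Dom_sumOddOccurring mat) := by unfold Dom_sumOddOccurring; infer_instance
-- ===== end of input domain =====

-- B replaces A's second full matrix scan by a single pass over the frequency table (objective: simpler).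

-- ===== PORT A =====
def sumOddOccurring (mat : List (List Int)) : Int :=
  let n : Int := PySem.List.len mat
  let m : Int := PySem.List.len (PySem.List.pyGetD mat 0 [])
  let mp : PySem.Dict Int Int :=
    (PySem.List.pyRange 0 n).foldl (fun mp i =>
      (PySem.List.pyRange 0 m).foldl (fun mp j =>
        let x := PySem.List.pyGetD (PySem.List.pyGetD mat i []) j 0
        match mp.get? x with
        | some c => mp.insert x (c + 1)
        | none   => mp.insert x 1) mp) PySem.Dict.empty
  (PySem.List.pyRange 0 n).foldl (fun s i =>
    (PySem.List.pyRange 0 m).foldl (fun s j =>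
      let x := PySem.List.pyGetD (PySem.List.pyGetD mat i []) j 0
      if PySem.Int.mod (mp.getD x 0) 2 = 1 then s + x else s) s) 0

-- ===== PORT B =====
def sumOddOccurring_alt (mat : List (List Int)) : Int :=
  let m : Int := PySem.List.len (PySem.List.pyGetD mat 0 [])
  let freq : PySem.Dict Int Int :=
    mat.foldl (fun f row =>
      (PySem.List.pyRange 0 m).foldl (fun f j =>
        let x := PySem.List.pyGetD row j 0
        f.insert x (f.getD x 0 + 1)) f) PySem.Dict.empty
  freq.items.foldl (fun s p => if PySem.Int.mod p.2 2 = 1 then s + p.1 * p.2 else s) 0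

-- ===== PRECONDITION & SPEC =====
-- Pre_ excludes exactly the inputs where the Python raises IndexError: the empty matrix
-- (len(mat[0])) and matrices with a row shorter than the first row (mat[i][j] out of range).
def Pre_sumOddOccurring (mat : List (List Int)) : Prop :=
  mat ≠ [] ∧ ∀ row ∈ mat, mat.headI.length ≤ row.length
instance (mat : List (List Int)) : Decidable (Pre_sumOddOccurring mat) := by
  unfold Pre_sumOddOccurring; infer_instance
def pvWitness_sumOddOccurring : List (List Int) := [[1, 2], [2, 3]]

def Spec_sumOddOccurring (mat : List (List Int)) (out : Int) : Prop := out = sumOddOccurring_alt mat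
instance (mat : List (List Int)) (out : Int) : Decidable (Spec_sumOddOccurring mat out) := by unfold Spec_sumOddOccurring; infer_instance

-- ===== CLAIM (what is proved, stated in full; the proofs are below) =====
def Claim_equal_sumOddOccurring : Prop := ∀ (mat : List (List Int)), Dom_sumOddOccurring mat → Pre_sumOddOccurring mat → Spec_sumOddOccurring mat (sumOddOccurring mat)

-- ===== LEMMAS AND PROOFS =====

-- the sequence of cells both programs visit: the first M entries of every row
def pvCells (mat : List (List Int)) (M : Nat) : List Int :=
  mat.flatMap (fun row => row.take M)

-- inner loop over range(k) with indexing = fold over the first k entries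
theorem pv_foldl_range_take {β : Type} (f : β → Int → β) (row : List Int) (k : Nat)
    (hk : k ≤ row.length) (init : β) :
    (PySem.List.pyRange 0 (k : Int)).foldl
        (fun acc j => f acc (PySem.List.pyGetD row j 0)) init
      = (row.take k).foldl f init := by
  induction k generalizing init with
  | zero => simp [PySem.List.pyRange_one_eq_nil]
  | succ k ih =>
    have hk' : k ≤ row.length := Nat.le_of_succ_le hk
    have hcast : ((k + 1 : Nat) : Int) = (k : Int) + 1 := by push_cast; ring
    rw [hcast, PySem.List.pyRange_one_succ_right (by positivity), List.foldl_append,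
      ih hk' init]
    have hlt : k < row.length := hk
    have : PySem.List.pyGetD row (k : Int) 0 = row[k] := by
      rw [PySem.List.pyGetD_eq_getElem row 0 (by positivity) (by exact_mod_cast hlt)]
      simp
    have hrt : row.take (k+1) = row.take k ++ [row[k]] := by
      rw [List.take_add_one]; simp [List.getElem?_eq_getElem hlt]
    rw [hrt, List.foldl_append]
    simp [List.foldl, this]

theorem pv_pyGetD_head (mat : List (List Int)) (h : mat ≠ []) :
    PySem.List.pyGetD mat 0 [] = mat.headI := by
  cases mat with
  | nil => simp at h
  | cons r t => simp [PySem.List.pyGetD, PySem.List.pyIdx?, PySem.List.pyGet?]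

-- A's counting step (if-in-dict) is the insert/getD step
theorem pv_stepA_eq (mp : PySem.Dict Int Int) (x : Int) :
    (match mp.get? x with
      | some c => mp.insert x (c + 1)
      | none   => mp.insert x 1)
      = mp.insert x (mp.getD x 0 + 1) := by
  cases h : mp.get? x with
  | some c => simp [PySem.Dict.getD_eq_get?_getD, h]
  | none => simp [PySem.Dict.getD_eq_get?_getD, h]

-- a guarded accumulation is init + a sum
theorem pv_foldl_if_add (l : List Int) (p : Int → Prop) [DecidablePred p] (f : Int → Int)
    (init : Int) :
    l.foldl (fun s x => if p x then s + f x else s) init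
      = init + (l.map (fun x => if p x then f x else 0)).sum := by
  have h : ∀ (s x : Int), (if p x then s + f x else s) = s + (if p x then f x else 0) := by
    intro s x; by_cases hp : p x <;> simp [hp]
  calc l.foldl (fun s x => if p x then s + f x else s) init
      = l.foldl (fun s x => s + (if p x then f x else 0)) init := by
        exact PySem.List.foldl_congr_mem l _ _ init (fun s x _ => h s x)
    _ = init + (l.map (fun x => if p x then f x else 0)).sum :=
        PySem.List.foldl_add l _ init

-- grouping: a per-cell sum equals the per-distinct-value sum weighted by count
theorem pv_group_sum (C : List Int) (p : Int → Prop) [DecidablePred p] :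
    (C.map (fun x => if p x then x else 0)).sum
      = ((PySem.Set.ofList C).map
          (fun k => if p k then k * (C.count k : Int) else 0)).sum := by
  have hS : (PySem.Set.ofList C : List Int).Nodup := PySem.Set.nodup_ofList C
  have hfin : (PySem.Set.ofList C : List Int).toFinset = C.toFinset := by
    ext x; simp [List.mem_toFinset, PySem.Set.mem_ofList]
  have h1 : (C.map (fun x => if p x then x else 0)).sum
      = ∑ k ∈ C.toFinset, (C.count k) • (if p k then k else 0) := by
    have := Finset.sum_multiset_map_count (C : Multiset Int)
      (fun x => if p x then x else 0)
    simpa using this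
  rw [h1, ← hfin, List.sum_toFinset _ hS]
  refine congrArg List.sum (List.map_congr_left ?_)
  intro k _
  by_cases hp : p k <;> simp [hp, mul_comm]

-- the counting loops of both ports build Counter(cells)
theorem pv_count_loop (mat : List (List Int)) (M : Nat)
    (hM : ∀ row ∈ mat, M ≤ row.length) :
    mat.foldl (fun f row =>
        (PySem.List.pyRange 0 (M : Int)).foldl
          (fun f j => let x := PySem.List.pyGetD row j 0
            f.insert x (f.getD x 0 + 1)) f) PySem.Dict.empty
      = PySem.Dict.counter (pvCells mat M) := by
  rw [← PySem.Dict.foldl_insert_getD_add_one_eq_counter, pvCells, List.foldl_flatMap]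
  exact PySem.List.foldl_congr_mem mat _ _ _
    (fun d row hrow =>
      pv_foldl_range_take (fun d x => d.insert x (d.getD x 0 + 1)) row M (hM row hrow) d)

-- ===== VERDICT (by name: the statement is the Claim_ definition above) =====
theorem sumOddOccurring_spec : Claim_equal_sumOddOccurring := by
  intro mat _ hpre
  obtain ⟨hne, hrows⟩ := hpre
  unfold Spec_sumOddOccurring
  have hm : PySem.List.len (PySem.List.pyGetD mat 0 []) = ((mat.headI.length : Nat) : Int) := by
    rw [pv_pyGetD_head mat hne]; simp [PySem.List.len]
  have hpass1 : mat.foldl (fun mp row =>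
        (PySem.List.pyRange 0 ((mat.headI.length : Nat) : Int)).foldl (fun mp j =>
          let x := PySem.List.pyGetD row j 0
          match mp.get? x with
          | some c => mp.insert x (c + 1)
          | none   => mp.insert x 1) mp) (PySem.Dict.empty : PySem.Dict Int Int)
      = PySem.Dict.counter (pvCells mat mat.headI.length) := by
    rw [← pv_count_loop mat mat.headI.length hrows]
    refine PySem.List.foldl_congr_mem mat _ _ _ (fun d row _ => ?_)
    exact PySem.List.foldl_congr_mem _ _ _ d (fun d' j _ => pv_stepA_eq d' _)
  have hpass1' : (PySem.List.pyRange 0 (PySem.List.len mat)).foldl (fun mp i =>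
        (PySem.List.pyRange 0 ((mat.headI.length : Nat) : Int)).foldl (fun mp j =>
          let x := PySem.List.pyGetD (PySem.List.pyGetD mat i []) j 0
          match mp.get? x with
          | some c => mp.insert x (c + 1)
          | none   => mp.insert x 1) mp) (PySem.Dict.empty : PySem.Dict Int Int)
      = PySem.Dict.counter (pvCells mat mat.headI.length) := by
    refine Eq.trans (PySem.List.foldl_pyRange_pyGetD mat []
      (fun (mp : PySem.Dict Int Int) row => (PySem.List.pyRange 0 ((mat.headI.length : Nat) : Int)).foldl (fun mp j =>
        let x := PySem.List.pyGetD row j 0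
        match mp.get? x with
        | some c => mp.insert x (c + 1)
        | none   => mp.insert x 1) mp) PySem.Dict.empty (le_refl 0)) ?_
    simpa using hpass1
  have hA : sumOddOccurring mat
      = 0 + ((pvCells mat mat.headI.length).map (fun x =>
          if PySem.Int.mod ((List.count x (pvCells mat mat.headI.length) : Nat) : Int) 2 = 1
          then x else 0)).sum := by
    simp only [sumOddOccurring, hm]
    rw [hpass1']
    refine Eq.trans (PySem.List.foldl_pyRange_pyGetD mat []
      (fun s row => (PySem.List.pyRange 0 ((mat.headI.length : Nat) : Int)).foldl (fun s j =>
        let x := PySem.List.pyGetD row j 0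
        if PySem.Int.mod
            ((PySem.Dict.counter (pvCells mat mat.headI.length)).getD x 0) 2 = 1
        then s + x else s) s) 0 (le_refl 0)) ?_
    refine Eq.trans (PySem.List.foldl_congr_mem mat _
      (fun s row => (row.take mat.headI.length).foldl (fun s x =>
        if PySem.Int.mod
            ((PySem.Dict.counter (pvCells mat mat.headI.length)).getD x 0) 2 = 1
        then s + x else s) s) 0 (fun s row hrow =>
          pv_foldl_range_take (fun s x =>
            if PySem.Int.mod
                ((PySem.Dict.counter (pvCells mat mat.headI.length)).getD x 0) 2 = 1
            then s + x else s) row mat.headI.length (hrows row hrow) s)) ?_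
    refine Eq.trans (List.foldl_flatMap).symm ?_
    simp only [PySem.Dict.getD_counter]
    exact pv_foldl_if_add _ _ (fun x => x) 0
  have hB : sumOddOccurring_alt mat
      = 0 + ((PySem.Set.ofList (pvCells mat mat.headI.length) : List Int).map (fun k =>
          if PySem.Int.mod ((List.count k (pvCells mat mat.headI.length) : Nat) : Int) 2 = 1
          then k * ((List.count k (pvCells mat mat.headI.length) : Nat) : Int) else 0)).sum := by
    simp only [sumOddOccurring_alt, hm]
    rw [pv_count_loop mat mat.headI.length hrows, PySem.Dict.items_counter, List.foldl_map]
    exact pv_foldl_if_add _ _ _ 0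
  rw [hA, hB]
  exact congrArg (0 + ·) (pv_group_sum (pvCells mat mat.headI.length) _)
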